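-- pv_equiv track=rewrite | github.com/praveend54/Leetcode | 3876-construct-uniform-parity-array-ii/3876-construct-uniform-parity-array-ii.py | uniformArray
-- ===== SOURCE A (Python) =====
-- def uniformArray(nums1: list[int]) -> bool:
--     m=float('inf')
--     e=0
--     for i in nums1:
--         m=min(m,i)
--         if i%2==0:
--             e+=1
--     if m%2!=0:
--         return True
--     if e==len(nums1):
--         return True
--     return False
-- ===== SOURCE B (Python) =====
-- def uniformArray(nums1: list[int]) -> bool:
--     odds = [i for i in nums1 if i % 2 != 0]
--     if not odds:
--         return True
--     evens = [i for i in nums1 if i % 2 == 0]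
--     if not evens:
--         return True
--     return min(odds) < min(evens)
-- ===== Notes on version B (the rewrite author's own statement) =====
-- stated objective: alternative
-- what changed: Instead of tracking a running global min and an even-element counter, B partitions the list by parity and compares the minimum of the odds with the minimum of the evens (the global min is odd iff the smallest odd is below the smallest even; no odds or no evens both mean True).
import Mathlib
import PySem

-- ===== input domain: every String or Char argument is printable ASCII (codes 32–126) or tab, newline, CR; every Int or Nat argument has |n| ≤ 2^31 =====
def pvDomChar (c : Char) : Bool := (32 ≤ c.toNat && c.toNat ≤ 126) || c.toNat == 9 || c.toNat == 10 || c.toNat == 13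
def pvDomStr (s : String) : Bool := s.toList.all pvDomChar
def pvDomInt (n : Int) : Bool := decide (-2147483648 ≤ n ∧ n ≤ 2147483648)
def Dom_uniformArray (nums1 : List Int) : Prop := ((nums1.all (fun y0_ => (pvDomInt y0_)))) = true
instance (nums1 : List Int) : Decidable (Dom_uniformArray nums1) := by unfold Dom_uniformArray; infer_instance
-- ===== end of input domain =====

-- B replaces A's fused running-min/even-count loop by partitioning into odds and evens
-- and comparing the two partition minima (alternative decomposition, same cost).

-- ===== PORT A =====
-- A's float('inf') sentinel is ported as Option Int (none = inf); min(m, i) with m = inf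
-- yields i, and 'inf % 2 != 0' is True (nan != 0), hence the none branch returns true.
def uniformArray (nums1 : List Int) : Bool :=
  let st := nums1.foldl (fun (p : Option Int × Int) i =>
    (match p.1 with
     | none => some i
     | some m => some (min m i),
     if PySem.Int.mod i 2 == 0 then p.2 + 1 else p.2)) (none, 0)
  match st.1 with
  | none => true
  | some m =>
    if PySem.Int.mod m 2 ≠ 0 then true
    else if st.2 = (nums1.length : Int) then true
    else false

-- ===== PORT B =====
-- Source B: two parity-filter comprehensions; Python's min builtin on a nonempty list is the
-- running-min fold t.foldl min x.
def uniformArray_alt (nums1 : List Int) : Bool :=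
  let odds := nums1.filter (fun i => PySem.Int.mod i 2 != 0)
  match odds with
  | [] => true
  | o :: os =>
    let evens := nums1.filter (fun i => PySem.Int.mod i 2 == 0)
    match evens with
    | [] => true
    | e :: es => decide (os.foldl min o < es.foldl min e)

-- ===== PRECONDITION & SPEC =====
def Spec_uniformArray (nums1 : List Int) (out : Bool) : Prop := out = uniformArray_alt nums1
instance (nums1 : List Int) (out : Bool) : Decidable (Spec_uniformArray nums1 out) := by unfold Spec_uniformArray; infer_instance

-- ===== CLAIM (what is proved, stated in full; the proofs are below) =====
def Claim_equal_uniformArray : Prop := ∀ (nums1 : List Int), Dom_uniformArray nums1 → Spec_uniformArray nums1 (uniformArray nums1)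

-- ===== LEMMAS AND PROOFS =====

-- A's loop from a concrete min m0 and counter e0: the min accumulates as foldl min,
-- the counter adds the number of even elements.
theorem uniformArray_foldA (l : List Int) (m0 e0 : Int) :
    l.foldl (fun (p : Option Int × Int) i =>
      (match p.1 with
       | none => some i
       | some m => some (min m i),
       if PySem.Int.mod i 2 == 0 then p.2 + 1 else p.2)) (some m0, e0)
    = (some (l.foldl min m0), e0 + (l.countP (fun i => PySem.Int.mod i 2 == 0) : Int)) := by
  induction l generalizing m0 e0 with
  | nil => simp
  | cons x t ih =>
    simp only [List.foldl_cons, List.countP_cons]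
    rw [ih, Prod.mk.injEq]
    refine ⟨rfl, ?_⟩
    split_ifs <;> push_cast <;> ring

theorem foldlMin_mem (x : Int) (t : List Int) : t.foldl min x ∈ x :: t := by
  induction t generalizing x with
  | nil => simp
  | cons y t ih =>
    simp only [List.foldl_cons]
    rcases List.mem_cons.1 (ih (min x y)) with h1 | h1
    · rw [h1]
      rcases min_choice x y with hm | hm <;> rw [hm] <;> simp
    · exact List.mem_cons_of_mem _ (List.mem_cons_of_mem _ h1)

theorem foldlMin_le (x : Int) (t : List Int) : ∀ y ∈ x :: t, t.foldl min x ≤ y := by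
  induction t generalizing x with
  | nil =>
    intro y hy
    simp only [List.mem_singleton] at hy
    subst hy; simp
  | cons z t ih =>
    intro y hy
    simp only [List.foldl_cons]
    have hhead : t.foldl min (min x z) ≤ min x z := ih (min x z) (min x z) (by simp)
    rcases List.mem_cons.1 hy with h1 | h1
    · subst h1; exact le_trans hhead (min_le_left _ _)
    · rcases List.mem_cons.1 h1 with h2 | h2
      · subst h2; exact le_trans hhead (min_le_right _ _)
      · exact ih (min x z) y (List.mem_cons_of_mem _ h2)

-- ===== VERDICT (by name: the statement is the Claim_ definition above) =====
theorem uniformArray_spec : Claim_equal_uniformArray := by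
  intro nums1 _
  unfold Spec_uniformArray uniformArray uniformArray_alt
  cases nums1 with
  | nil => simp
  | cons x t =>
    simp only [List.foldl_cons]
    rw [show (match (none : Option Int) with
              | none => some x
              | some m => some (min m x),
              if PySem.Int.mod x 2 == 0 then (0:Int) + 1 else 0)
        = ((some x : Option Int), if PySem.Int.mod x 2 == 0 then (1:Int) else 0) by
          split_ifs <;> norm_num]
    rw [uniformArray_foldA]
    dsimp only
    set l := x :: t with hl
    set M := t.foldl min x with hM
    have hMmem : M ∈ l := foldlMin_mem x t
    have hMle : ∀ y ∈ l, M ≤ y := foldlMin_le x t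
    have hcount : ((if PySem.Int.mod x 2 == 0 then (1:Int) else 0)
          + (t.countP (fun i => PySem.Int.mod i 2 == 0) : Int)
          = (l.length : Int))
        ↔ (l.countP (fun i => PySem.Int.mod i 2 == 0) = l.length) := by
      rw [hl, List.countP_cons, List.length_cons]
      split_ifs <;> push_cast <;> omega
    rcases ho : l.filter (fun i => PySem.Int.mod i 2 != 0) with _ | ⟨o, os⟩
    · -- no odd element: every element is even, so A's count equals the length
      have hall : ∀ y ∈ l, PySem.Int.mod y 2 = 0 := by
        intro y hy
        by_contra hne
        have hmem : y ∈ l.filter (fun i => PySem.Int.mod i 2 != 0) :=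
          List.mem_filter.2 ⟨hy, by simp only [bne_iff_ne]; exact hne⟩
        rw [ho] at hmem
        simp at hmem
      have hcnt : l.countP (fun i => PySem.Int.mod i 2 == 0) = l.length :=
        List.countP_eq_length.2 (fun a ha => by
          simp only [beq_iff_eq]; exact hall a ha)
      rw [if_neg (fun h => h (hall M hMmem)), if_pos (hcount.2 hcnt)]
    · -- some odd element exists
      have homem0 : o ∈ l.filter (fun i => PySem.Int.mod i 2 != 0) := by
        rw [ho]; exact List.mem_cons_self ..
      have homem := List.mem_filter.1 homem0
      simp only [bne_iff_ne] at homem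
      have hcnt : ¬ l.countP (fun i => PySem.Int.mod i 2 == 0) = l.length := by
        intro h
        have h2 := List.countP_eq_length.1 h o homem.1
        simp only [beq_iff_eq] at h2
        exact homem.2 h2
      rcases he : l.filter (fun i => PySem.Int.mod i 2 == 0) with _ | ⟨e, es⟩
      · -- no even element: every element (hence M) is odd
        have hall : ∀ y ∈ l, PySem.Int.mod y 2 ≠ 0 := by
          intro y hy hz
          have hmem : y ∈ l.filter (fun i => PySem.Int.mod i 2 == 0) :=
            List.mem_filter.2 ⟨hy, by simp only [beq_iff_eq]; exact hz⟩
          rw [he] at hmem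
          simp at hmem
        rw [if_pos (hall M hMmem)]
      · -- both parts nonempty: A = (M odd), B = (min odds < min evens)
        rw [if_neg (fun h => hcnt (hcount.1 h))]
        set mo := os.foldl min o with hmo
        set me := es.foldl min e with hme
        have hmoMem : mo ∈ l ∧ PySem.Int.mod mo 2 ≠ 0 := by
          have h1 : mo ∈ l.filter (fun i => PySem.Int.mod i 2 != 0) := by
            rw [ho]; exact foldlMin_mem o os
          have h2 := List.mem_filter.1 h1
          simp only [bne_iff_ne] at h2
          exact h2
        have hmeMem : me ∈ l ∧ PySem.Int.mod me 2 = 0 := by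
          have h1 : me ∈ l.filter (fun i => PySem.Int.mod i 2 == 0) := by
            rw [he]; exact foldlMin_mem e es
          have h2 := List.mem_filter.1 h1
          simp only [beq_iff_eq] at h2
          exact h2
        have hmoLB : ∀ y ∈ l, PySem.Int.mod y 2 ≠ 0 → mo ≤ y := by
          intro y hy hodd
          apply foldlMin_le o os
          have hmem : y ∈ l.filter (fun i => PySem.Int.mod i 2 != 0) :=
            List.mem_filter.2 ⟨hy, by simp only [bne_iff_ne]; exact hodd⟩
          rw [ho] at hmem; exact hmem
        have hmeLB : ∀ y ∈ l, PySem.Int.mod y 2 = 0 → me ≤ y := by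
          intro y hy hev
          apply foldlMin_le e es
          have hmem : y ∈ l.filter (fun i => PySem.Int.mod i 2 == 0) :=
            List.mem_filter.2 ⟨hy, by simp only [beq_iff_eq]; exact hev⟩
          rw [he] at hmem; exact hmem
        have hiff : PySem.Int.mod M 2 ≠ 0 ↔ mo < me := by
          constructor
          · intro hModd
            have h1 : mo ≤ M := hmoLB M hMmem hModd
            have h2 : M ≤ me := hMle me hmeMem.1
            have h3 : M ≠ me := fun h => hModd (h ▸ hmeMem.2)
            omega
          · intro hlt
            have hMeq : M = mo := by
              have h1 : mo ≤ M := by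
                by_cases hp : PySem.Int.mod M 2 = 0
                · have := hmeLB M hMmem hp; omega
                · exact hmoLB M hMmem hp
              have h2 : M ≤ mo := hMle mo hmoMem.1
              omega
            rw [hMeq]; exact hmoMem.2
        by_cases hc : PySem.Int.mod M 2 ≠ 0
        · rw [if_pos hc, eq_comm, decide_eq_true_eq]; exact hiff.1 hc
        · rw [if_neg hc, eq_comm, decide_eq_false_iff_not]
          exact fun h => hc (hiff.2 h)
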